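-- pv_equiv track=rewrite | github.com/jung-chang/leetcode | misc/airtable/files.py | all_dirs
-- ===== SOURCE A (Python) =====
-- from typing import List
--
-- def get_dirs(path: str):
--     """
--     home/
--         asd/
--             asd_folder1/
--                 asd_file1
--                 asd_file2
--             asd_folder2/
--                 empty
--             qwe/
--                 local/
--                     tmp/
--                         tmp_file1
--                         tmp_file2
--                 logs/
--                     log_asd
--                     log_qwe
--             asd_readme
--     """
--     dirs = {
--         "/home/asd/": ["asd_folder1/", "asd_folder2/", "asd_readme", "asd_qwe/"],
--         "/home/asd/asd_folder1/": ["asd_file1", "asd_file2"],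
--         "/home/asd/qwe/": ["local/", "logs/"],
--         "/home/asd/qwe/local/": ["tmp/"],
--         "/home/asd/qwe/local/tmp/": ["tmp_file1", "tmp_file2"],
--         "/home/asd/qwe/logs/": ["log_asd", "log_qwe"],
--     }
--     return dirs.get(path, [])
--
-- def all_dirs(directory: str) -> List[str]:
--     dir_paths = set()
--
--     def dfs(dir: str):
--         sub_paths = get_dirs(dir)
--
--         if not sub_paths:
--             dir_paths.add(dir)
--             return
--
--         for sub_path in sub_paths:
--             dfs(dir + sub_path)
--
--     dfs(directory)
--     return dir_paths
-- ===== SOURCE B (Python) =====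
-- from typing import List
--
-- def get_dirs(path: str):
--     dirs = {
--         "/home/asd/": ["asd_folder1/", "asd_folder2/", "asd_readme", "asd_qwe/"],
--         "/home/asd/asd_folder1/": ["asd_file1", "asd_file2"],
--         "/home/asd/qwe/": ["local/", "logs/"],
--         "/home/asd/qwe/local/": ["tmp/"],
--         "/home/asd/qwe/local/tmp/": ["tmp_file1", "tmp_file2"],
--         "/home/asd/qwe/logs/": ["log_asd", "log_qwe"],
--     }
--     return dirs.get(path, [])
--
-- def all_dirs(directory: str) -> List[str]:
--     leaves = []
--     stack = [directory]
--     while stack: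
--         node = stack.pop()
--         subs = get_dirs(node)
--         if subs:
--             stack.extend(node + s for s in reversed(subs))
--         else:
--             leaves.append(node)
--     return set(leaves)
-- ===== Notes on version B (the rewrite author's own statement) =====
-- stated objective: alternative
-- what changed: Replaces the recursive inner dfs closure that mutates an enclosing set with an iterative explicit-stack loop (pop from the end, push reversed children) that appends leaves to a plain list and builds the set once at the end.
import Mathlib
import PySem

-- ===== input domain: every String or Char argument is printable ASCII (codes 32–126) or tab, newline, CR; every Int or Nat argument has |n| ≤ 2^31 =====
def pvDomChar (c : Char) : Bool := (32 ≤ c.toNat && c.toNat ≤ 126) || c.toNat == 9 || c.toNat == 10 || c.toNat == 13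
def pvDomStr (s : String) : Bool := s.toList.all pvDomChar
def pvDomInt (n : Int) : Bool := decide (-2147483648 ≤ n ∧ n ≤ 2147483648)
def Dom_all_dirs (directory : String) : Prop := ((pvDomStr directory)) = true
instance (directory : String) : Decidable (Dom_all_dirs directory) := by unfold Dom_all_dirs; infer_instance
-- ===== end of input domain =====

-- B replaces A's recursive closure mutating a set with an iterative explicit-stack loop
-- collecting leaves into a list and building the set once at the end; same return value.
-- Both ports carry a fuel parameter solely to make the recursion total in Lean; the fuel
-- provably never runs out at the values the wrappers pass (the proofs below use exactly that).

-- ===== PORT A =====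
-- helper get_dirs: the module-level dict lookup, shared by both Pythons
def get_dirs (path : String) : List String :=
  PySem.Dict.getD (PySem.Dict.ofList
    [("/home/asd/", ["asd_folder1/", "asd_folder2/", "asd_readme", "asd_qwe/"]),
     ("/home/asd/asd_folder1/", ["asd_file1", "asd_file2"]),
     ("/home/asd/qwe/", ["local/", "logs/"]),
     ("/home/asd/qwe/local/", ["tmp/"]),
     ("/home/asd/qwe/local/tmp/", ["tmp_file1", "tmp_file2"]),
     ("/home/asd/qwe/logs/", ["log_asd", "log_qwe"])]) path []

-- A's dfs: recursion on the tree (set accumulated, as Python's closure mutates dir_paths);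
-- fuel bounds the recursion DEPTH (dict keys have length ≤ 24 and children strictly grow, so depth < 26 ≤ 32)
def dfsA : Nat → String → PySem.Set String → PySem.Set String
  | 0, _, acc => acc
  | fuel + 1, dir, acc =>
    let sub_paths := get_dirs dir
    if sub_paths = [] then PySem.Set.add acc dir
    else sub_paths.foldl (fun a s => dfsA fuel (dir ++ s) a) acc

def all_dirs (directory : String) : List String :=
  dfsA 32 directory PySem.Set.empty

-- ===== PORT B =====
-- B's explicit-stack loop: pop the LAST node, push its children reversed, append leaves to a list;
-- fuel bounds the number of ITERATIONS (each iteration strictly decreases Σ 5^(40-len), which starts ≤ 5^40)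
def loopB : Nat → List String → List String → List String
  | 0, _, leaves => leaves
  | fuel + 1, stack, leaves =>
    if hst : stack = [] then leaves
    else
      let node := stack.getLast hst
      let rest := stack.dropLast
      let subs := get_dirs node
      if subs = [] then loopB fuel rest (leaves ++ [node])
      else loopB fuel (rest ++ subs.reverse.map (fun s => node ++ s)) leaves

def all_dirs_alt (directory : String) : List String :=
  PySem.Set.ofList (loopB (5 ^ 40) [directory] [])

-- ===== PRECONDITION & SPEC =====
def Spec_all_dirs (directory : String) (out : List String) : Prop := out = all_dirs_alt directory
instance (directory : String) (out : List String) : Decidable (Spec_all_dirs directory out) := by unfold Spec_all_dirs; infer_instance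

-- ===== CLAIM (what is proved, stated in full; the proofs are below) =====
def Claim_equal_all_dirs : Prop := ∀ (directory : String), Dom_all_dirs directory → Spec_all_dirs directory (all_dirs directory)

-- ===== LEMMAS AND PROOFS =====

theorem get_dirs_mk (dir : String) :
    get_dirs dir = (PySem.Dict.getD (PySem.Dict.mk
      [("/home/asd/", ["asd_folder1/", "asd_folder2/", "asd_readme", "asd_qwe/"]),
       ("/home/asd/asd_folder1/", ["asd_file1", "asd_file2"]),
       ("/home/asd/qwe/", ["local/", "logs/"]),
       ("/home/asd/qwe/local/", ["tmp/"]),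
       ("/home/asd/qwe/local/tmp/", ["tmp_file1", "tmp_file2"]),
       ("/home/asd/qwe/logs/", ["log_asd", "log_qwe"])]) dir []) := rfl

theorem get_dirs_cases (dir : String) :
    get_dirs dir = [] ∨
      (dir.length ≤ 24 ∧ (get_dirs dir).length ≤ 4 ∧
        ∀ s ∈ get_dirs dir, 1 ≤ s.length ∧ s.length ≤ 12) := by
  rw [get_dirs_mk]
  simp only [PySem.Dict.getD, PySem.Dict.get?_mk_cons]
  split_ifs with h1 h2 h3 h4 h5 h6
  · right; have := beq_iff_eq.mp h1; subst this; decide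
  · right; have := beq_iff_eq.mp h2; subst this; decide
  · right; have := beq_iff_eq.mp h3; subst this; decide
  · right; have := beq_iff_eq.mp h4; subst this; decide
  · right; have := beq_iff_eq.mp h5; subst this; decide
  · right; have := beq_iff_eq.mp h6; subst this; decide
  · left; rfl

theorem key_short {dir : String} (h : ¬ get_dirs dir = []) : dir.length ≤ 24 := by
  rcases get_dirs_cases dir with hc | ⟨hd, _, _⟩
  · exact absurd hc h
  · exact hd

theorem child_longer {dir s : String} (h : ¬ get_dirs dir = []) (hs : s ∈ get_dirs dir) :
    dir.length + 1 ≤ (dir ++ s).length := by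
  rcases get_dirs_cases dir with hc | ⟨_, _, hlens⟩
  · exact absurd hc h
  · obtain ⟨h1, _⟩ := hlens s hs
    simp only [String.length_append]
    omega

theorem pv_sum_leaf (stack : List String) (hst : ¬ stack = []) :
    ((stack.dropLast.map (fun d => 5 ^ (40 - d.length))).sum)
      < ((stack.map (fun d => 5 ^ (40 - d.length))).sum) := by
  conv_rhs => rw [← List.dropLast_append_getLast hst]
  simp only [List.map_append, List.sum_append, List.map_cons, List.map_nil, List.sum_cons,
    List.sum_nil]
  have : 1 ≤ 5 ^ (40 - (stack.getLast hst).length) := Nat.one_le_pow _ _ (by norm_num)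
  omega

theorem pv_sum_node (stack : List String) (hst : ¬ stack = [])
    (h : ¬ get_dirs (stack.getLast hst) = []) :
    (((stack.dropLast ++ ((get_dirs (stack.getLast hst)).reverse.map
        fun s => stack.getLast hst ++ s)).map (fun d => 5 ^ (40 - d.length))).sum)
      < ((stack.map (fun d => 5 ^ (40 - d.length))).sum) := by
  conv_rhs => rw [← List.dropLast_append_getLast hst]
  simp only [List.map_append, List.sum_append, List.map_cons, List.map_nil, List.sum_cons,
    List.sum_nil]
  have hlt : (((get_dirs (stack.getLast hst)).reverse.map
        (fun s => stack.getLast hst ++ s)).map (fun d => 5 ^ (40 - d.length))).sum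
      < 5 ^ (40 - (stack.getLast hst).length) := by
    set node := stack.getLast hst
    rcases get_dirs_cases node with hc | ⟨hd, hlen, hs⟩
    · exact absurd hc h
    · have hb : ∀ x ∈ (((get_dirs node).reverse.map (fun s => node ++ s)).map
            (fun d => 5 ^ (40 - d.length))), x ≤ 5 ^ (39 - node.length) := by
        intro x hx
        simp only [List.map_map, List.mem_map, Function.comp, List.mem_reverse] at hx
        obtain ⟨s, hsmem, rfl⟩ := hx
        obtain ⟨h1, h2⟩ := hs s hsmem
        exact Nat.pow_le_pow_right (by norm_num)
          (by simp only [String.length_append]; omega)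
      have hsum := List.sum_le_card_nsmul _ _ hb
      have hlen' : (((get_dirs node).reverse.map (fun s => node ++ s)).map
          (fun d => 5 ^ (40 - d.length))).length ≤ 4 := by simpa using hlen
      have h40 : 40 - node.length = (39 - node.length) + 1 := by omega
      calc (((get_dirs node).reverse.map (fun s => node ++ s)).map
              (fun d => 5 ^ (40 - d.length))).sum
          ≤ (((get_dirs node).reverse.map (fun s => node ++ s)).map
              (fun d => 5 ^ (40 - d.length))).length * 5 ^ (39 - node.length) := by
            simpa [smul_eq_mul] using hsum
        _ ≤ 4 * 5 ^ (39 - node.length) := Nat.mul_le_mul_right _ hlen'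
        _ < 5 ^ (40 - node.length) := by
              rw [h40, pow_succ]
              have : 0 < 5 ^ (39 - node.length) := Nat.pow_pos (by norm_num)
              omega
  omega

-- proof-only helper: the DFS leaf list of a node at a given fuel (A's visiting order)
def leavesOfF : Nat → String → List String
  | 0, _ => []
  | fuel + 1, dir =>
    let subs := get_dirs dir
    if subs = [] then [dir]
    else subs.flatMap (fun s => leavesOfF fuel (dir ++ s))

theorem flatMap_congr_mem {α β : Type} (l : List α) (f g : α → List β)
    (h : ∀ x ∈ l, f x = g x) : l.flatMap f = l.flatMap g := by
  induction l with
  | nil => rfl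
  | cons x xs ih =>
      simp only [List.flatMap_cons, h x (List.mem_cons_self), ih (fun y hy => h y (List.mem_cons_of_mem x hy))]

theorem leavesOfF_stable : ∀ (f : Nat) (g : Nat) (dir : String),
    1 ≤ f → 1 ≤ g → 26 ≤ dir.length + f → 26 ≤ dir.length + g →
    leavesOfF f dir = leavesOfF g dir := by
  intro f
  induction f with
  | zero => intro g dir hf; omega
  | succ f ih =>
      intro g dir _ hg hlf hlg
      obtain ⟨g', rfl⟩ : ∃ g', g = g' + 1 := ⟨g - 1, by omega⟩
      rw [leavesOfF, leavesOfF]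
      by_cases h : get_dirs dir = []
      · simp [h]
      · simp only [h, if_false]
        refine flatMap_congr_mem _ _ _ (fun s hs => ?_)
        have hshort := key_short h
        have hchild := child_longer h hs
        exact ih g' (dir ++ s) (by omega) (by omega) (by omega) (by omega)

theorem leavesOfF_leaf (f : Nat) (dir : String) (h : get_dirs dir = []) :
    leavesOfF (f + 1) dir = [dir] := by
  rw [leavesOfF]; simp [h]

theorem leavesOfF_node (dir : String) (h : ¬ get_dirs dir = []) :
    leavesOfF 26 dir = (get_dirs dir).flatMap (fun s => leavesOfF 26 (dir ++ s)) := by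
  show leavesOfF (25 + 1) dir = _
  rw [leavesOfF]
  simp only [h, if_false]
  refine flatMap_congr_mem _ _ _ (fun s hs => ?_)
  have hshort := key_short h
  have hchild := child_longer h hs
  exact leavesOfF_stable 25 26 (dir ++ s) (by omega) (by omega) (by omega) (by omega)

theorem dfsA_eq_foldl : ∀ (f : Nat) (dir : String) (acc : PySem.Set String),
    dfsA f dir acc = List.foldl PySem.Set.add acc (leavesOfF f dir) := by
  intro f
  induction f with
  | zero => intro dir acc; rfl
  | succ f ih =>
      intro dir acc
      rw [dfsA, leavesOfF]
      by_cases h : get_dirs dir = []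
      · simp [h]
      · simp only [h, if_false]
        induction (get_dirs dir) generalizing acc with
        | nil => rfl
        | cons x xs ihx =>
            simp only [List.foldl_cons, List.flatMap_cons, List.foldl_append]
            rw [ih (dir ++ x) acc, ihx]

theorem loopB_eq : ∀ (f : Nat) (stack leaves : List String),
    (stack.map (fun d => 5 ^ (40 - d.length))).sum ≤ f →
    loopB f stack leaves = leaves ++ stack.reverse.flatMap (leavesOfF 26) := by
  intro f
  induction f with
  | zero =>
      intro stack leaves hm
      cases stack with
      | nil => simp [loopB]
      | cons d t =>
          exfalso
          simp only [List.map_cons, List.sum_cons] at hm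
          have : 1 ≤ 5 ^ (40 - d.length) := Nat.one_le_pow _ _ (by norm_num)
          omega
  | succ f ih =>
      intro stack leaves hm
      rw [loopB]
      by_cases hst : stack = []
      · simp [hst]
      · rw [dif_neg hst]
        by_cases h : get_dirs (stack.getLast hst) = []
        · rw [if_pos h, ih _ _ (by have := pv_sum_leaf stack hst; omega)]
          conv_rhs => rw [← List.dropLast_append_getLast hst]
          simp [List.reverse_append, leavesOfF_leaf 25 _ h, List.append_assoc]
        · rw [if_neg h, ih _ _ (by have := pv_sum_node stack hst h; omega)]
          conv_rhs => rw [← List.dropLast_append_getLast hst]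
          simp only [List.reverse_append, List.flatMap_append, List.reverse_cons, List.reverse_nil,
            List.nil_append, List.singleton_append, List.flatMap_cons,
            List.map_reverse, List.reverse_reverse, List.flatMap_map]
          simp [leavesOfF_node _ h]

-- ===== VERDICT (by name: the statement is the Claim_ definition above) =====
theorem all_dirs_spec : Claim_equal_all_dirs := by
  intro directory _
  unfold Spec_all_dirs all_dirs all_dirs_alt
  rw [dfsA_eq_foldl,
    loopB_eq (5 ^ 40) [directory] []
      (by
        simp only [List.map_cons, List.map_nil, List.sum_cons, List.sum_nil]
        have : 5 ^ (40 - directory.length) ≤ 5 ^ 40 :=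
          Nat.pow_le_pow_right (by norm_num) (by omega)
        omega),
    leavesOfF_stable 32 26 directory (by omega) (by omega) (by omega) (by omega)]
  simp [PySem.Set.ofList_eq_foldl]
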